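-- pv_equiv track=rewrite | github.com/utilmind/MySQL-Migration-from-Windows-PC | strip-mysql-compatibility-comments.py | find_conditional_end
-- ===== SOURCE A (Python) =====
-- from typing import Tuple, Optional
--
-- def find_conditional_end(comment: str) -> Tuple[Optional[int], Optional[int]]:
--     """
--     Given a string that starts with a versioned comment:
--
--         /*!<digits>...
--
--     find the index of the closing "*/" that terminates THIS comment,
--     correctly handling nested regular block comments "/* ... */" inside.
--
--     Returns:
--         (end_pos, digits_end)
--
--         end_pos   - index where the closing "*/" starts (or None if not found)
--         digits_end - index right after the version digits (i.e. start of inner content)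
--     """
--     n = len(comment)
--     # comment[0:3] should be "/*!"
--     j = 3
--     while j < n and comment[j].isdigit():
--         j += 1
--     digits_end = j
--     version_str = comment[3:digits_end]
--     if not version_str:
--         return None, None
--
--     depth = 0
--     k = digits_end
--     end_pos = None
--
--     while k < n - 1:
--         two = comment[k:k + 2]
--
--         if two == "/*":
--             # nested regular block comment
--             depth += 1
--             k += 2
--             continue
--
--         if two == "*/":
--             if depth == 0:
--                 end_pos = k
--                 break
--             else:
--                 depth -= 1
--                 k += 2
--                 continue
--
--         k += 1
--
--     return end_pos, digits_end
-- ===== SOURCE B (Python) =====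
-- def _close_at(comment, k):
--     """Return the start index of the '*/' closing the comment body that
--     begins at k, skipping each nested '/* ... */' by a recursive call."""
--     n = len(comment)
--     while k < n - 1:
--         if comment.startswith('/*', k):
--             inner = _close_at(comment, k + 2)   # recurse into the nested comment
--             if inner is None:
--                 return None
--             k = inner + 2                        # resume right after its '*/'
--         elif comment.startswith('*/', k):
--             return k
--         else:
--             k += 1
--     return None
--
-- def find_conditional_end(comment):
--     n = len(comment)
--     j = 3
--     while j < n and comment[j].isdigit():
--         j += 1
--     if j == 3:
--         return None, None
--     return _close_at(comment, j), j
-- ===== Notes on version B (the rewrite author's own statement) =====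
-- stated objective: alternative
-- what changed: Replaced A's single loop with a depth counter by a recursive-descent matcher: on an opening delimiter it recursively finds the matching closer of the nested comment and resumes after it, so no depth accumulator exists.
import Mathlib
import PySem

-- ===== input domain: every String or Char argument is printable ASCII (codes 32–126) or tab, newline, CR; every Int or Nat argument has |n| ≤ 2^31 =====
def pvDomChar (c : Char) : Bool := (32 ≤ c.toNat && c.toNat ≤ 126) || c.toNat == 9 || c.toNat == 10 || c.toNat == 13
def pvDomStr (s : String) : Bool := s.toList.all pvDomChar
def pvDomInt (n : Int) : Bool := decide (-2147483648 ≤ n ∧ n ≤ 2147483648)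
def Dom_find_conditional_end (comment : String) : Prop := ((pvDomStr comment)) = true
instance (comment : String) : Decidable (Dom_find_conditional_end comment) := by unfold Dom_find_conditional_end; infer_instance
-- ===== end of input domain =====

-- B replaces A's single scan with a depth accumulator by a recursive-descent matcher
-- (on an opening delimiter it recursively locates the nested comment's closer and
-- resumes after it); objective: alternative decomposition, same linear cost.

-- ===== PORT A =====
-- while j < n and comment[j].isdigit(): j += 1   — counts leading ASCII digits of the suffix
def pvA_digits : List Char → Nat
  | [] => 0
  | c :: rest => if PySem.Chars.isdigit c then pvA_digits rest + 1 else 0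

-- the while-k loop: suffix of the string (at least 2 chars remain ↔ k < n-1),
-- absolute position k, depth
def pvA_loop : List Char → Int → Int → Option Int
  | c1 :: c2 :: rest, k, depth =>
      if c1 = '/' ∧ c2 = '*' then
        pvA_loop rest (k + 2) (depth + 1)
      else if c1 = '*' ∧ c2 = '/' then
        if depth = 0 then some k
        else pvA_loop rest (k + 2) (depth - 1)
      else pvA_loop (c2 :: rest) (k + 1) depth
  | _, _, _ => none

def find_conditional_end (comment : String) : Option Int × Option Int :=
  let cs := comment.toList
  let digits_end : Nat := 3 + pvA_digits (cs.drop 3)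
  -- version_str = comment[3:digits_end] is empty iff no digit was counted
  if pvA_digits (cs.drop 3) = 0 then (none, none)
  else (pvA_loop (cs.drop digits_end) (digits_end : Int) 0, some (digits_end : Int))

-- ===== PORT B =====
def pvB_digits : List Char → Nat
  | [] => 0
  | c :: rest => if PySem.Chars.isdigit c then pvB_digits rest + 1 else 0

-- _close_at(comment, k): the suffix of the string starting at k, and k itself.
-- Returns the absolute index of the closing '*/' together with the suffix right
-- after it (the subtype proof only serves termination of the loop-resumption call).
def pvB_close : (cs : List Char) → Int → Option (Int × {l : List Char // l.length + 2 ≤ cs.length})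
  | c1 :: c2 :: rest, k =>
      if c1 = '/' ∧ c2 = '*' then
        -- inner = _close_at(comment, k + 2); then resume the loop at inner + 2
        match pvB_close rest (k + 2) with
        | none => none
        | some (i, ⟨rest', h⟩) =>
          match pvB_close rest' (i + 2) with
          | none => none
          | some (j, ⟨rest'', h2⟩) => some (j, ⟨rest'', by simp only [List.length_cons]; omega⟩)
      else if c1 = '*' ∧ c2 = '/' then some (k, ⟨rest, by simp⟩)
      else
        match pvB_close (c2 :: rest) (k + 1) with
        | none => none
        | some (j, ⟨rest'', h2⟩) => some (j, ⟨rest'', by simp only [List.length_cons] at h2 ⊢; omega⟩)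
  | _, _ => none
  termination_by cs _ => cs.length
  decreasing_by all_goals (simp only [List.length_cons] at *; omega)

def find_conditional_end_alt (comment : String) : Option Int × Option Int :=
  let cs := comment.toList
  let j : Nat := 3 + pvB_digits (cs.drop 3)
  if pvB_digits (cs.drop 3) = 0 then (none, none)
  else ((pvB_close (cs.drop j) (j : Int)).map (fun p => p.1), some (j : Int))

-- ===== PRECONDITION & SPEC =====
def Spec_find_conditional_end (comment : String) (out : Option Int × Option Int) : Prop := out = find_conditional_end_alt comment
instance (comment : String) (out : Option Int × Option Int) : Decidable (Spec_find_conditional_end comment out) := by unfold Spec_find_conditional_end; infer_instance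

-- ===== CLAIM (what is proved, stated in full; the proofs are below) =====
def Claim_equal_find_conditional_end : Prop := ∀ (comment : String), Dom_find_conditional_end comment → Spec_find_conditional_end comment (find_conditional_end comment)

-- ===== LEMMAS AND PROOFS =====
theorem pv_digits_eq (cs : List Char) : pvA_digits cs = pvB_digits cs := by
  induction cs with
  | nil => rfl
  | cons c rest ih => simp [pvA_digits, pvB_digits, ih]

-- the joint invariant: A's loop at depth d+1 behaves like "find one close, then
-- continue at depth d", and at depth 0 it returns exactly B's recursive descent
theorem pv_key : ∀ (n : Nat) (cs : List Char), cs.length ≤ n →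
    (∀ (k d : Int), 0 ≤ d → pvA_loop cs k (d + 1) =
       (match pvB_close cs k with
        | none => none
        | some (i, ⟨r, _⟩) => pvA_loop r (i + 2) d)) ∧
    (∀ k : Int, pvA_loop cs k 0 = (pvB_close cs k).map (fun p => p.1)) := by
  intro n
  induction n with
  | zero =>
      intro cs hlen
      have : cs = [] := List.eq_nil_of_length_eq_zero (Nat.le_zero.mp hlen)
      subst this
      exact ⟨fun k d _ => by simp [pvA_loop, pvB_close], fun k => by simp [pvA_loop, pvB_close]⟩
  | succ n ih =>
      intro cs hlen
      match cs with
      | [] => exact ⟨fun k d _ => by simp [pvA_loop, pvB_close], fun k => by simp [pvA_loop, pvB_close]⟩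
      | [c] => exact ⟨fun k d _ => by simp [pvA_loop, pvB_close], fun k => by simp [pvA_loop, pvB_close]⟩
      | c1 :: c2 :: rest =>
        have hrest : rest.length ≤ n := by simp at hlen; omega
        constructor
        · intro k d hd
          by_cases ho : c1 = '/' ∧ c2 = '*'
          · -- open: descend
            rw [pvA_loop, if_pos ho]
            rw [pvB_close]
            rw [if_pos ho]
            have h1 := (ih rest hrest).1 (k + 2) (d + 1) (by omega)
            rw [show d + 1 + 1 = (d + 1) + 1 from rfl, h1]
            cases hb : pvB_close rest (k + 2) with
            | none => simp
            | some p =>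
              obtain ⟨i, r', hr'⟩ := p
              simp only
              have hr'n : r'.length ≤ n := by omega
              have h2 := (ih r' hr'n).1 (i + 2) d hd
              rw [h2]
              cases hb2 : pvB_close r' (i + 2) with
              | none => simp
              | some q => obtain ⟨j, r'', hr''⟩ := q; simp
          · by_cases hc : c1 = '*' ∧ c2 = '/'
            · rw [pvA_loop, if_neg ho, if_pos hc, if_neg (by omega : ¬ d + 1 = 0)]
              rw [pvB_close, if_neg ho, if_pos hc]
              simp
            · rw [pvA_loop, if_neg ho, if_neg hc]
              rw [pvB_close, if_neg ho, if_neg hc]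
              have h1 := (ih (c2 :: rest) (by simp at hlen ⊢; omega)).1 (k + 1) d hd
              rw [h1]
              cases hb : pvB_close (c2 :: rest) (k + 1) with
              | none => simp
              | some q => obtain ⟨j, r'', hr''⟩ := q; simp
        · intro k
          by_cases ho : c1 = '/' ∧ c2 = '*'
          · rw [pvA_loop, if_pos ho]
            rw [pvB_close, if_pos ho]
            have h1 := (ih rest hrest).1 (k + 2) 0 le_rfl
            rw [h1]
            cases hb : pvB_close rest (k + 2) with
            | none => simp
            | some p =>
              obtain ⟨i, r', hr'⟩ := p
              simp only
              have hr'n : r'.length ≤ n := by omega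
              have h2 := (ih r' hr'n).2 (i + 2)
              rw [h2]
              cases hb2 : pvB_close r' (i + 2) with
              | none => simp
              | some q => obtain ⟨j, r'', hr''⟩ := q; simp
          · by_cases hc : c1 = '*' ∧ c2 = '/'
            · rw [pvA_loop, if_neg ho, if_pos hc, if_pos rfl]
              rw [pvB_close, if_neg ho, if_pos hc]
              simp
            · rw [pvA_loop, if_neg ho, if_neg hc]
              rw [pvB_close, if_neg ho, if_neg hc]
              have h1 := (ih (c2 :: rest) (by simp at hlen ⊢; omega)).2 (k + 1)
              rw [h1]
              cases hb : pvB_close (c2 :: rest) (k + 1) with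
              | none => simp
              | some q => obtain ⟨j, r'', hr''⟩ := q; simp

theorem pv_loop_eq (cs : List Char) (k : Int) :
    pvA_loop cs k 0 = (pvB_close cs k).map (fun p => p.1) :=
  (pv_key cs.length cs le_rfl).2 k

-- ===== VERDICT (by name: the statement is the Claim_ definition above) =====
theorem find_conditional_end_spec : Claim_equal_find_conditional_end := by
  intro comment _
  unfold Spec_find_conditional_end find_conditional_end find_conditional_end_alt
  simp only [pv_digits_eq, pv_loop_eq]
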